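-- pv_equiv track=rewrite | github.com/Jeje763/Projet-OS | Fonction de texte.py | nb_mot_ligne
-- ===== SOURCE A (Python) =====
-- def nb_mot_ligne(ligne):
--     nb=0
--     zone_espace=True
--     for k in ligne:
--         if k==" ":
--             zone_espace=True
--         else:
--             if zone_espace:
--                 nb+=1
--                 zone_espace=False
--     return nb
-- ===== SOURCE B (Python) =====
-- def nb_mot_ligne(ligne):
--     return len([w for w in ligne.split(" ") if w])
-- ===== Notes on version B (the rewrite author's own statement) =====
-- stated objective: idiomatic
-- what changed: Replaces A's space-to-nonspace transition state machine with splitting the line on the literal space character and counting the non-empty tokens.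
import Mathlib
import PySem

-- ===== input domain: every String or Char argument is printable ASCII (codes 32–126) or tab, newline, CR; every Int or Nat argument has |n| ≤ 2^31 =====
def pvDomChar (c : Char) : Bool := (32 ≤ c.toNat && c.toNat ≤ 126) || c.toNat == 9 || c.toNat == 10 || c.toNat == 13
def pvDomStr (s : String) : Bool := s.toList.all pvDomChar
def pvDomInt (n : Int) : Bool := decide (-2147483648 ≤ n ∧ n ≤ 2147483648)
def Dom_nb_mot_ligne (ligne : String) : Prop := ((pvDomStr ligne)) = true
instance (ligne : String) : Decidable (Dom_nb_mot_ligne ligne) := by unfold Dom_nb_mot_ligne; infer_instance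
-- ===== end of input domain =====

-- B replaces A's space→non-space transition state machine by splitting on " " and
-- counting non-empty tokens (idiomatic; same behaviour, same cost).

-- ===== PORT A =====
-- literal port of A's loop: state (nb, zone_espace), one step per character
def pvStepA (st : Int × Bool) (k : Char) : Int × Bool :=
  if k = ' ' then (st.1, true)
  else if st.2 then (st.1 + 1, false) else (st.1, st.2)

def nb_mot_ligne (ligne : String) : Int :=
  (ligne.toList.foldl pvStepA (0, true)).1

-- ===== PORT B =====
-- literal port of B: ligne.split(" "), keep non-empty tokens, take the length
def nb_mot_ligne_alt (ligne : String) : Int :=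
  ((PySem.Chars.splitOn ligne.toList [' ']).filter (fun w => w ≠ [])).length

-- ===== PRECONDITION & SPEC =====
def Spec_nb_mot_ligne (ligne : String) (out : Int) : Prop := out = nb_mot_ligne_alt ligne
instance (ligne : String) (out : Int) : Decidable (Spec_nb_mot_ligne ligne out) := by unfold Spec_nb_mot_ligne; infer_instance

-- ===== CLAIM (what is proved, stated in full; the proofs are below) =====
def Claim_equal_nb_mot_ligne : Prop := ∀ (ligne : String), Dom_nb_mot_ligne ligne → Spec_nb_mot_ligne ligne (nb_mot_ligne ligne)

-- ===== LEMMAS AND PROOFS =====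

-- word count of l continuing from zone_espace state z (A's state machine as a function)
def pvW (l : List Char) (z : Bool) : Int :=
  match l with
  | [] => 0
  | c :: rest =>
    if c = ' ' then pvW rest true
    else if z then 1 + pvW rest false else pvW rest false

lemma foldA_eq_W (l : List Char) (nb : Int) (z : Bool) :
    (l.foldl pvStepA (nb, z)).1 = nb + pvW l z := by
  induction l generalizing nb z with
  | nil => simp [pvW]
  | cons c rest ih =>
    by_cases hc : c = ' '
    · simp [pvStepA, pvW, hc, ih]
    · cases z <;> simp [pvStepA, pvW, hc, ih] <;> ring

def pvCountNE (xs : List (List Char)) : Int :=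
  (xs.filter (fun w => w ≠ [])).length

lemma countNE_reverse (xs : List (List Char)) : pvCountNE xs.reverse = pvCountNE xs := by
  simp [pvCountNE]

lemma countNE_cons (x : List Char) (xs : List (List Char)) :
    pvCountNE (x :: xs) = (if x = [] then 0 else 1) + pvCountNE xs := by
  by_cases h : x = [] <;> simp [pvCountNE, h] <;> push_cast <;> ring

lemma go_count (fuel : Nat) (l cur : List Char) (acc : List (List Char))
    (hf : l.length < fuel) :
    pvCountNE (PySem.Chars.splitOn.go [' '] fuel l cur acc) =
      pvCountNE acc + (if cur = [] then pvW l true else 1 + pvW l false) := by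
  induction fuel generalizing l cur acc with
  | zero => omega
  | succ f ih =>
    cases l with
    | nil =>
      simp only [PySem.Chars.splitOn.go, countNE_reverse, countNE_cons]
      by_cases hc : cur = [] <;> simp [pvW, hc] <;> ring
    | cons c rest =>
      by_cases hc : c = ' '
      · have hp : List.isPrefixOf [' '] (c :: rest) = true := by
          simp [List.isPrefixOf, hc]
        rw [PySem.Chars.splitOn.go]
        simp only [hp, if_pos, List.length_cons, List.length_nil, List.drop_succ_cons,
          List.drop_zero]
        rw [ih rest [] (cur.reverse :: acc) (by simpa using Nat.lt_of_succ_lt_succ hf)]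
        simp only [countNE_cons, countNE_reverse]
        by_cases h2 : cur = [] <;> simp [pvW, hc, h2] <;> ring
      · have hp : List.isPrefixOf [' '] (c :: rest) = false := by
          simp [List.isPrefixOf]; exact fun h => hc (h.symm)
        rw [PySem.Chars.splitOn.go]
        simp only [hp, Bool.false_eq_true, if_false]
        rw [ih rest (c :: cur) acc (by simpa using Nat.lt_of_succ_lt_succ hf)]
        by_cases h2 : cur = [] <;> simp [pvW, hc, h2]

lemma alt_eq_W (l : List Char) :
    pvCountNE (PySem.Chars.splitOn l [' ']) = pvW l true := by
  rw [PySem.Chars.splitOn, go_count _ _ _ _ (by omega)]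
  simp [pvCountNE]

-- ===== VERDICT (by name: the statement is the Claim_ definition above) =====
theorem nb_mot_ligne_spec : Claim_equal_nb_mot_ligne := by
  intro ligne _
  unfold Spec_nb_mot_ligne nb_mot_ligne nb_mot_ligne_alt
  rw [foldA_eq_W]
  have := alt_eq_W ligne.toList
  simp [pvCountNE] at this ⊢
  omega
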